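-- pv_equiv track=rewrite | github.com/pulp-platform/stream-ebpc | tb/common/bpc.py | ZNZ_ZRLE
-- ===== SOURCE A (Python) =====
-- import math
--
-- def ZNZ_ZRLE(values, max_burst_len=16):
--   znz_stream = [0 if el == 0 else 1 for el in values]
--   zrle_stream = ''
--   zero_run = 0
--   bw_zrle = math.ceil(math.log2(max_burst_len))
--   for el in znz_stream:
--       if el == 0:
--           if zero_run == max_burst_len-1:
--             zrle_stream += '0' + bin(max_burst_len-1)[2:].zfill(bw_zrle)
--             zero_run = 0
--           else:
--             zero_run += 1
--       else:
--           if zero_run != 0: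
--             zrle_stream += ('0' + bin(zero_run-1)[2:].zfill(bw_zrle))
--             zero_run = 0
--           zrle_stream += '1'
--   # catch any remaining zero run
--   if zero_run != 0:
--     zrle_stream += ('0' + bin(zero_run-1)[2:].zfill(bw_zrle))
--   return zrle_stream
-- ===== SOURCE B (Python) =====
-- import math
--
-- def ZNZ_ZRLE(values, max_burst_len=16):
--     # Run-grouping re-implementation: split the stream into maximal runs of
--     # zeros / non-zeros and encode each run arithmetically (divmod) instead of
--     # driving a per-element counter state machine.
--     bw = math.ceil(math.log2(max_burst_len))
--     full = '0' + bin(max_burst_len - 1)[2:].zfill(bw)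
--     parts = []
--     i, n = 0, len(values)
--     while i < n:
--         j = i
--         if values[i] == 0:
--             while j < n and values[j] == 0:
--                 j += 1
--             q, r = divmod(j - i, max_burst_len)
--             parts.append(full * q)
--             if r:
--                 parts.append('0' + bin(r - 1)[2:].zfill(bw))
--         else:
--             while j < n and values[j] != 0:
--                 j += 1
--             parts.append('1' * (j - i))
--         i = j
--     return ''.join(parts)
-- ===== Notes on version B (the rewrite author's own statement) =====
-- stated objective: alternative
-- what changed: Replaces the per-element zero-run counter state machine with run-grouping: the stream is split into maximal zero/non-zero runs and each zero run of length L is encoded arithmetically via divmod(L, max_burst_len).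
import Mathlib
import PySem

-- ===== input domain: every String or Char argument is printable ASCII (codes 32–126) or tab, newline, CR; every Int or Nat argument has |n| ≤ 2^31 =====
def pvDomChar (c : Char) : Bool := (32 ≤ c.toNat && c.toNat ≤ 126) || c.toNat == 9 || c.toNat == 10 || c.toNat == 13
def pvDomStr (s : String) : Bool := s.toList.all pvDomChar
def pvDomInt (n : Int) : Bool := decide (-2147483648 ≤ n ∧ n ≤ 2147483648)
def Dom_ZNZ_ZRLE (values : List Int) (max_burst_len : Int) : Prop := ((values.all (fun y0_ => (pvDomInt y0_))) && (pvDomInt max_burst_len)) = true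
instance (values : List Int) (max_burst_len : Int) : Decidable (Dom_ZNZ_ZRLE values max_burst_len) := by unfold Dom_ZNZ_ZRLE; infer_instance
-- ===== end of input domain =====

-- B replaces A's per-element zero-run counter state machine by run-grouping:
-- split into maximal zero / non-zero runs and encode each zero run via divmod.

-- '0' + bin(k)[2:].zfill(bw)  (k : Nat).  Nat.toDigits 2 k = bin(k)[2:], incl. toDigits 2 0 = "0".
def pvCode (bw k : Nat) : List Char :=
  '0' :: (List.replicate (bw - (Nat.toDigits 2 k).length) '0' ++ Nat.toDigits 2 k)

-- ===== PORT A =====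
-- math.ceil(math.log2 m) for an int m ≥ 1 is exactly Nat.clog 2 m (the float is exact on |m| ≤ 2^31).
def ZNZ_ZRLE (values : List Int) (max_burst_len : Int) : String :=
  let znz := values.map (fun el => if el == 0 then (0 : Int) else 1)
  let m := max_burst_len.toNat
  let bw := Nat.clog 2 m
  let st := znz.foldl (fun (st : List Char × Nat) el =>
      if el == 0 then
        if st.2 == m - 1 then (st.1 ++ pvCode bw (m - 1), 0)
        else (st.1, st.2 + 1)
      else
        ((if st.2 != 0 then st.1 ++ pvCode bw (st.2 - 1) else st.1) ++ ['1'], 0))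
    ([], 0)
  -- catch any remaining zero run
  String.mk (if st.2 != 0 then st.1 ++ pvCode bw (st.2 - 1) else st.1)

-- ===== PORT B =====
-- the run loop of Source B: one step per maximal run, zero runs encoded by q, r = divmod(L, m)
def pvAltRuns (m bw : Nat) : List Int → List Char
  | [] => []
  | x :: xs =>
    if x == 0 then
      let L := (List.takeWhile (fun v => v == 0) xs).length + 1
      (List.replicate (L / m) (pvCode bw (m - 1))).flatten
        ++ (if L % m != 0 then pvCode bw (L % m - 1) else [])
        ++ pvAltRuns m bw (List.dropWhile (fun v => v == 0) xs)
    else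
      List.replicate ((List.takeWhile (fun v => !(v == 0)) xs).length + 1) '1'
        ++ pvAltRuns m bw (List.dropWhile (fun v => !(v == 0)) xs)
termination_by vs => vs.length
decreasing_by
  all_goals exact Nat.lt_succ_of_le (List.length_dropWhile_le _ _)

def ZNZ_ZRLE_alt (values : List Int) (max_burst_len : Int) : String :=
  let m := max_burst_len.toNat
  let bw := Nat.clog 2 m
  String.mk (pvAltRuns m bw values)

-- ===== PRECONDITION & SPEC =====
-- A raises ValueError (math.log2 domain error) when max_burst_len ≤ 0; only those inputs are excluded.
def Pre_ZNZ_ZRLE (values : List Int) (max_burst_len : Int) : Prop := 1 ≤ max_burst_len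
instance (values : List Int) (max_burst_len : Int) : Decidable (Pre_ZNZ_ZRLE values max_burst_len) := by unfold Pre_ZNZ_ZRLE; infer_instance
def pvWitness_ZNZ_ZRLE : List Int × Int := ([0, 3, 0, 0, 0, 0, 0, -1, 0], 4)

def Spec_ZNZ_ZRLE (values : List Int) (max_burst_len : Int) (out : String) : Prop := out = ZNZ_ZRLE_alt values max_burst_len
instance (values : List Int) (max_burst_len : Int) (out : String) : Decidable (Spec_ZNZ_ZRLE values max_burst_len out) := by unfold Spec_ZNZ_ZRLE; infer_instance

-- ===== CLAIM (what is proved, stated in full; the proofs are below) =====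
def Claim_equal_ZNZ_ZRLE : Prop := ∀ (values : List Int) (max_burst_len : Int), Dom_ZNZ_ZRLE values max_burst_len → Pre_ZNZ_ZRLE values max_burst_len → Spec_ZNZ_ZRLE values max_burst_len (ZNZ_ZRLE values max_burst_len)

-- ===== LEMMAS AND PROOFS =====

-- A's loop body with the znz mapping fused in ((if el==0 then 0 else 1) == 0 ↔ el == 0)
def pvStepA (m bw : Nat) (st : List Char × Nat) (x : Int) : List Char × Nat :=
  if x == 0 then
    if st.2 == m - 1 then (st.1 ++ pvCode bw (m - 1), 0)
    else (st.1, st.2 + 1)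
  else
    ((if st.2 != 0 then st.1 ++ pvCode bw (st.2 - 1) else st.1) ++ ['1'], 0)

def pvFlush (m bw : Nat) (st : List Char × Nat) : List Char :=
  if st.2 != 0 then st.1 ++ pvCode bw (st.2 - 1) else st.1

lemma pvBody_eq (m bw : Nat) :
    (fun (st : List Char × Nat) (el : Int) =>
      if (if el == 0 then (0 : Int) else 1) == 0 then
        if st.2 == m - 1 then (st.1 ++ pvCode bw (m - 1), 0)
        else (st.1, st.2 + 1)
      else
        ((if st.2 != 0 then st.1 ++ pvCode bw (st.2 - 1) else st.1) ++ ['1'], 0)) = pvStepA m bw := by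
  funext st x
  unfold pvStepA
  by_cases h : x = 0 <;> simp [h]

lemma pvA_as_step (values : List Int) (max_burst_len : Int) :
    ZNZ_ZRLE values max_burst_len =
      String.mk (pvFlush max_burst_len.toNat (Nat.clog 2 max_burst_len.toNat)
        (values.foldl (pvStepA max_burst_len.toNat (Nat.clog 2 max_burst_len.toNat)) ([], 0))) := by
  unfold ZNZ_ZRLE pvFlush
  simp only [List.foldl_map, pvBody_eq]

lemma pvFold_zeros (m bw : Nat) (hm : 0 < m) :
    ∀ (L : Nat) (z : List Char) (r : Nat), r < m →
      List.foldl (pvStepA m bw) (z, r) (List.replicate L 0) =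
        (z ++ (List.replicate ((r + L) / m) (pvCode bw (m - 1))).flatten, (r + L) % m) := by
  intro L
  induction L with
  | zero =>
    intro z r hr
    simp [Nat.div_eq_of_lt hr, Nat.mod_eq_of_lt hr]
  | succ L ih =>
    intro z r hr
    rw [List.replicate_succ, List.foldl_cons]
    by_cases h : r = m - 1
    · have hstep : pvStepA m bw (z, r) 0 = (z ++ pvCode bw (m - 1), 0) := by
        simp [pvStepA, h]
      rw [hstep, ih _ 0 hm]
      have h1 : r + (L + 1) = L + m := by omega
      have h2 : (L + m) / m = L / m + 1 := Nat.add_div_right L hm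
      have h3 : (L + m) % m = L % m := Nat.add_mod_right L m
      rw [h1, h2, h3]
      simp [List.replicate_succ, List.append_assoc]
    · have hr1 : r + 1 < m := by omega
      have hstep : pvStepA m bw (z, r) 0 = (z, r + 1) := by
        simp [pvStepA]
        omega
      rw [hstep, ih _ (r + 1) hr1]
      have : r + 1 + L = r + (L + 1) := by omega
      rw [this]

lemma pvFold_ones (m bw : Nat) :
    ∀ (ws : List Int) (z : List Char), (∀ x ∈ ws, ¬ x = 0) →
      List.foldl (pvStepA m bw) (z, 0) ws = (z ++ List.replicate ws.length '1', 0) := by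
  intro ws
  induction ws with
  | nil => intro z _; simp
  | cons y ys ih =>
    intro z h
    have hy : ¬ y = 0 := h y (by simp)
    have hstep : pvStepA m bw (z, 0) y = (z ++ ['1'], 0) := by
      simp [pvStepA, hy]
    rw [List.foldl_cons, hstep, ih _ (fun x hx => h x (by simp [hx]))]
    simp [List.replicate_succ]

-- a pending zero run is flushed by the first non-zero element: shift it into the accumulator
lemma pvFold_shift (m bw : Nat) (y : Int) (ys : List Int) (z : List Char) (r : Nat) (hy : ¬ y = 0) :
    List.foldl (pvStepA m bw) (z, r) (y :: ys) =
      List.foldl (pvStepA m bw) (z ++ (if r != 0 then pvCode bw (r - 1) else []), 0) (y :: ys) := by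
  rw [List.foldl_cons, List.foldl_cons]
  congr 1
  by_cases h : r = 0 <;> simp [pvStepA, hy, h]

lemma pvHead_dropWhile {p : Int → Bool} {l : List Int} {y : Int} {ys : List Int}
    (h : List.dropWhile p l = y :: ys) : p y = false := by
  induction l with
  | nil => simp at h
  | cons a l ih =>
    by_cases ha : p a
    · rw [List.dropWhile_cons_of_pos ha] at h; exact ih h
    · rw [List.dropWhile_cons_of_neg ha] at h
      cases h
      simpa using ha

lemma pvMain (m bw : Nat) (hm : 0 < m) :
    ∀ (n : Nat) (vs : List Int) (z : List Char), vs.length ≤ n →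
      pvFlush m bw (List.foldl (pvStepA m bw) (z, 0) vs) = z ++ pvAltRuns m bw vs := by
  intro n
  induction n with
  | zero =>
    intro vs z hn
    match vs with
    | [] => simp [pvFlush, pvAltRuns]
    | x :: xs => simp at hn
  | succ n ih =>
    intro vs z hn
    match vs with
    | [] => simp [pvFlush, pvAltRuns]
    | x :: xs =>
      have hxslen : xs.length ≤ n := by
        have := hn
        simp only [List.length_cons] at this
        omega
      by_cases hx : x = 0
      · -- zero run
        subst hx
        set t := List.takeWhile (fun v : Int => v == 0) xs with ht
        set rest := List.dropWhile (fun v : Int => v == 0) xs with hrest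
        have hxs : xs = t ++ rest := (List.takeWhile_append_dropWhile).symm
        have htrep : (0 : Int) :: t = List.replicate (t.length + 1) 0 := by
          rw [List.replicate_succ]
          congr 1
          apply List.eq_replicate_of_mem
          intro b hb
          have := List.mem_takeWhile_imp (ht ▸ hb)
          simpa using this
        have hrlen : rest.length ≤ n := by
          have h2 : rest.length ≤ xs.length := hrest ▸ List.length_dropWhile_le _ _
          omega
        have hfold : List.foldl (pvStepA m bw) (z, 0) ((0 : Int) :: xs) =
            List.foldl (pvStepA m bw)
              (z ++ (List.replicate ((t.length + 1) / m) (pvCode bw (m - 1))).flatten,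
                (t.length + 1) % m) rest := by
          conv_lhs => rw [hxs, show (0 : Int) :: (t ++ rest) = ((0 : Int) :: t) ++ rest from rfl,
            List.foldl_append, htrep]
          rw [pvFold_zeros m bw hm (t.length + 1) z 0 hm]
          simp
        have hunfold : pvAltRuns m bw ((0 : Int) :: xs) =
            (List.replicate ((t.length + 1) / m) (pvCode bw (m - 1))).flatten
              ++ (if (t.length + 1) % m != 0 then pvCode bw ((t.length + 1) % m - 1) else [])
              ++ pvAltRuns m bw rest := by
          rw [pvAltRuns]
          simp [ht, hrest]
        match hre : rest, hrest, hfold, hunfold, hrlen with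
        | [], hrest, hfold, hunfold, hrlen =>
          rw [hfold, hunfold]
          simp only [List.foldl_nil, pvFlush, pvAltRuns]
          by_cases hmod : (t.length + 1) % m = 0 <;> simp [hmod, List.append_assoc]
        | y :: ys, hrest, hfold, hunfold, hrlen =>
          have hy : ¬ y = 0 := by
            have := pvHead_dropWhile hrest.symm
            simpa using this
          rw [hfold, pvFold_shift m bw y ys _ _ hy, ih (y :: ys) _ hrlen, hunfold]
          by_cases hmod : (t.length + 1) % m = 0 <;> simp [hmod, List.append_assoc]
      · -- non-zero run
        set t := List.takeWhile (fun v : Int => !(v == 0)) xs with ht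
        set rest := List.dropWhile (fun v : Int => !(v == 0)) xs with hrest
        have hxs : xs = t ++ rest := (List.takeWhile_append_dropWhile).symm
        have htall : ∀ a ∈ x :: t, ¬ a = 0 := by
          intro a ha
          rcases List.mem_cons.mp ha with h | h
          · subst h; exact hx
          · have := List.mem_takeWhile_imp (ht ▸ h)
            simpa using this
        have hrlen : rest.length ≤ n := by
          have h2 : rest.length ≤ xs.length := hrest ▸ List.length_dropWhile_le _ _
          omega
        have hfold : List.foldl (pvStepA m bw) (z, 0) (x :: xs) =
            List.foldl (pvStepA m bw) (z ++ List.replicate (t.length + 1) '1', 0) rest := by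
          conv_lhs => rw [hxs, show x :: (t ++ rest) = (x :: t) ++ rest from rfl, List.foldl_append]
          rw [pvFold_ones m bw (x :: t) z htall]
          simp
        have hunfold : pvAltRuns m bw (x :: xs) =
            List.replicate (t.length + 1) '1' ++ pvAltRuns m bw rest := by
          rw [pvAltRuns]
          simp [ht, hrest, hx]
        rw [hfold, ih rest _ hrlen, hunfold, List.append_assoc]

-- ===== VERDICT (by name: the statement is the Claim_ definition above) =====
theorem ZNZ_ZRLE_spec : Claim_equal_ZNZ_ZRLE := by
  intro values max_burst_len _ hpre
  unfold Spec_ZNZ_ZRLE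
  rw [pvA_as_step]
  unfold ZNZ_ZRLE_alt
  have hm : 0 < max_burst_len.toNat := by
    have : (1 : Int) ≤ max_burst_len := hpre
    omega
  rw [pvMain _ _ hm values.length values [] (le_refl _)]
  simp
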